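-- pv_equiv track=rewrite | github.com/Panosso/estudos | python/challenges/ball_bucket_done/buckets.py | solution
-- ===== SOURCE A (Python) =====
-- def solution(buckets):
--
--     string_len = len(buckets)
--     ball_count = buckets.count("B")
--     moves = 0
--
--     if string_len % 2 == 0:
--         is_possible = -1 if ball_count > int(string_len / 2) else 0
--
--     else:
--         is_possible = -1 if ball_count > int((string_len + 1) / 2) else 0
--
--     if is_possible == -1:
--         return is_possible
--
--     else:
--         buckets = list(buckets)
--         for i in range(1, len(buckets)-1 ):
--             before_pos = buckets[i-1]
--             actual_pos = buckets[i]
--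
--             if before_pos == 'B' and actual_pos == 'B':
--                 moves += 1
--                 buckets[i] = '.'
--
--     return moves
-- ===== SOURCE B (Python) =====
-- def solution(buckets):
--     n = len(buckets)
--     if buckets.count('B') > (n + 1) // 2:
--         return -1
--     moves = 0
--     run = 0
--     for c in buckets:
--         if c == 'B':
--             run += 1
--         else:
--             moves += run // 2
--             run = 0
--     return moves + run // 2
-- ===== Notes on version B (the rewrite author's own statement) =====
-- stated objective: simpler
-- what changed: Replaces the list-mutating pairwise scan (and the even/odd duplicated feasibility guard) with a single immutable run-length pass that adds floor(run/2) per maximal 'B'-run; B scans the whole string, fixing A's range(1,len-1) off-by-one that ignores a ball pair ending at the last bucket.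
-- intended difference: On feasible strings whose trailing maximal run of 'B' has positive even length (e.g. '.BB'), A's loop range(1,len-1) never inspects the final pair and returns one move too few (0 for '.BB'), while B returns the intended full count (1), since the last bucket's adjacent ball pair also needs a move. — e.g. on solution(".BB"): A returns 0, B returns 1
import Mathlib
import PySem

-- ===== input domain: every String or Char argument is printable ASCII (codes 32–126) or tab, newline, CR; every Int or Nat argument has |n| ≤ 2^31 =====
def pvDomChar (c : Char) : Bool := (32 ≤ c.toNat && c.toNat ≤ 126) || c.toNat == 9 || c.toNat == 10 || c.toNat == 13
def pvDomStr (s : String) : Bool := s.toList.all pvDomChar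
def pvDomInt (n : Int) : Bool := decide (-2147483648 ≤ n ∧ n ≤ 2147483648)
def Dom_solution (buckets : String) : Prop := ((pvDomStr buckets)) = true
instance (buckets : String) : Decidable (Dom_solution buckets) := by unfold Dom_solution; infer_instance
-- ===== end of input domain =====

-- B replaces A's list-mutating pairwise scan (and its even/odd duplicated feasibility guard) by a
-- single immutable run-length pass, and scans the whole string, fixing A's range(1, len-1)
-- off-by-one that ignores a ball pair ending at the last bucket (see D_solution below).

-- ===== PORT A =====
-- Loop body of A's for-loop: state is (the mutable list, moves).  The loop indices produced by
-- range(1, len-1) are always in range, so pyGetD/pySetD with a dummy default are exact here.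
def pvStepA (st : List Char × Int) (i : Int) : List Char × Int :=
  let before_pos := PySem.List.pyGetD st.1 (i - 1) ' '
  let actual_pos := PySem.List.pyGetD st.1 i ' '
  if before_pos = 'B' ∧ actual_pos = 'B' then (PySem.List.pySetD st.1 i '.', st.2 + 1)
  else (st.1, st.2)

-- int(string_len/2) resp. int((string_len+1)/2): the float quotient is exact (the branch taken
-- makes the numerator even) and int() of a nonnegative value is floor, so floordiv is exact here.
def solution (buckets : String) : Int :=
  let string_len : Int := PySem.Str.len buckets
  let ball_count : Int := (PySem.Str.count buckets "B" : Int)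
  let is_possible : Int :=
    if PySem.Int.mod string_len 2 = 0 then
      if ball_count > PySem.Int.floordiv string_len 2 then -1 else 0
    else
      if ball_count > PySem.Int.floordiv (string_len + 1) 2 then -1 else 0
  if is_possible = -1 then is_possible
  else
    let bl := buckets.toList
    ((PySem.List.pyRange 1 (PySem.List.len bl - 1) 1).foldl pvStepA (bl, 0)).2

-- ===== PORT B =====
def solution_alt (buckets : String) : Int :=
  let n : Int := PySem.Str.len buckets
  if (PySem.Str.count buckets "B" : Int) > PySem.Int.floordiv (n + 1) 2 then -1
  else
    let st := buckets.toList.foldl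
      (fun (st : Int × Int) c =>
        if c = 'B' then (st.1, st.2 + 1) else (st.1 + PySem.Int.floordiv st.2 2, 0))
      (0, 0)
    st.1 + PySem.Int.floordiv st.2 2

-- ===== PRECONDITION & SPEC =====
-- Length of the trailing maximal run of 'B' in the input (input inspection only).
def pvTrail (t : List Char) : Nat := (t.reverse.takeWhile (fun c => c == 'B')).length

-- On feasible strings whose trailing maximal run of 'B' has positive even length (e.g. ".BB"),
-- A's loop range(1, len-1) never inspects the final pair and returns one move too few (0 for
-- ".BB"), while B returns the intended full count (1): the last bucket's adjacent ball pair
-- also needs a move.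
def D_solution (buckets : String) : Prop :=
  (PySem.Str.count buckets "B" : Int) ≤ PySem.Int.floordiv (PySem.Str.len buckets + 1) 2 ∧
  0 < pvTrail buckets.toList ∧ pvTrail buckets.toList % 2 = 0
instance (buckets : String) : Decidable (D_solution buckets) := by unfold D_solution; infer_instance

def Spec_solution (buckets : String) (out : Int) : Prop := ¬ D_solution buckets → out = solution_alt buckets
instance (buckets : String) (out : Int) : Decidable (Spec_solution buckets out) := by unfold Spec_solution; infer_instance

def pvDiffWitness_solution : String := ".BB"
def pvDiffWitnessOut_solution : Int × Int := (0, 1)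

-- ===== CLAIM (what is proved, stated in full; the proofs are below) =====
def Claim_unchanged_solution : Prop := ∀ (buckets : String), Dom_solution buckets → Spec_solution buckets (solution buckets)
def Claim_changed_solution : Prop := Dom_solution (pvDiffWitness_solution) ∧ D_solution (pvDiffWitness_solution) ∧ solution (pvDiffWitness_solution) = pvDiffWitnessOut_solution.1 ∧ solution_alt (pvDiffWitness_solution) = pvDiffWitnessOut_solution.2 ∧ pvDiffWitnessOut_solution.1 ≠ pvDiffWitnessOut_solution.2
def Claim_exact_solution : Prop := ∀ (buckets : String), Dom_solution buckets → D_solution buckets → solution buckets ≠ solution_alt buckets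

-- ===== LEMMAS AND PROOFS =====

-- Pure carry form of A's mutation loop: prev is the (possibly already blanked) previous bucket.
def pvScanA : Char → List Char → Int → Int
  | _, [], m => m
  | prev, c :: t, m => if prev = 'B' ∧ c = 'B' then pvScanA '.' t (m + 1) else pvScanA c t m

-- Pure form of B's fold.
def pvRun : List Char → Int → Int → Int
  | [], m, r => m + PySem.Int.floordiv r 2
  | c :: t, m, r => if c = 'B' then pvRun t m (r + 1) else pvRun t (m + PySem.Int.floordiv r 2) 0

-- Whether A's carry scan started with carry prev on t would pair the final element of t.
def pvDiffB : Char → List Char → Bool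
  | _, [] => false
  | prev, [c] => decide (prev = 'B') && decide (c = 'B')
  | prev, c :: c' :: t => pvDiffB (if prev = 'B' ∧ c = 'B' then '.' else c) (c' :: t)

theorem pvScanA_congr (t : List Char) : ∀ (p q : Char) (m : Int),
    (p = 'B' ↔ q = 'B') → pvScanA p t m = pvScanA q t m := by
  induction t with
  | nil => intro p q m _; rfl
  | cons c t ih =>
    intro p q m h
    simp only [pvScanA]
    by_cases hc : c = 'B'
    · by_cases hp : p = 'B'
      · rw [if_pos ⟨hp, hc⟩, if_pos ⟨h.mp hp, hc⟩]
      · rw [if_neg (fun hh => hp hh.1), if_neg (fun hh => hp (h.mpr hh.1))]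
    · rw [if_neg (fun hh => hc hh.2), if_neg (fun hh => hc hh.2)]

theorem pv_fd2 (r : Int) : PySem.Int.floordiv r 2 = r / 2 :=
  PySem.Int.floordiv_eq_ediv_of_pos (by omega)

theorem pv_drop_dropLast_set (l : List Char) (i j : Nat) (v : Char) (h : i < j) :
    ((l.set i v).dropLast).drop j = (l.dropLast).drop j := by
  apply List.ext_getElem
  · simp
  · intro k h1 h2
    have hA : j + k < (l.set i v).dropLast.length := by simp at h1 ⊢; omega
    have hB : j + k < l.dropLast.length := by simp at h2 ⊢; omega
    simp only [List.getElem_drop, List.getElem_dropLast]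
    exact List.getElem_set_ne (by omega) (by simp at hA ⊢; omega)

-- A's foldl over range(i, len-1) equals the pure carry scan on the untouched suffix.
theorem pvLoopA : ∀ (k : Nat) (cs : List Char) (i : Nat) (m : Int), 1 ≤ i →
    cs.length - 1 - i ≤ k →
    ((PySem.List.pyRange (i : Int) ((cs.length : Int) - 1) 1).foldl pvStepA (cs, m)).2
      = pvScanA (cs.getD (i - 1) ' ') ((cs.dropLast).drop i) m := by
  intro k
  induction k with
  | zero =>
    intro cs i m h1 hk
    rw [PySem.List.pyRange_one_eq_nil (by omega)]
    rw [List.drop_eq_nil_of_le (by simp; omega)]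
    rfl
  | succ k ih =>
    intro cs i m h1 hk
    by_cases hlt : i < cs.length - 1
    · rw [PySem.List.pyRange_one_cons (by omega)]
      simp only [List.foldl_cons]
      have hi1 : (i : Int) - 1 = ((i - 1 : Nat) : Int) := by omega
      have hilen : i < cs.length := by omega
      have hstep : pvStepA (cs, m) (i : Int) =
          if cs.getD (i - 1) ' ' = 'B' ∧ cs.getD i ' ' = 'B'
          then (cs.set i '.', m + 1) else (cs, m) := by
        simp only [pvStepA, hi1]
        simp [PySem.List.pyGetD_natCast]
      have hdropc : (cs.dropLast).drop i = cs[i] :: (cs.dropLast).drop (i + 1) := by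
        have hi' : i < cs.dropLast.length := by simp; omega
        rw [List.drop_eq_getElem_cons hi', List.getElem_dropLast]
      have hgetDi : cs.getD i ' ' = cs[i] := List.getD_eq_getElem cs ' ' hilen
      rw [hstep]
      by_cases hbb : cs.getD (i - 1) ' ' = 'B' ∧ cs.getD i ' ' = 'B'
      · rw [if_pos hbb]
        have hlen' : (cs.set i '.').length = cs.length := by simp
        have hrec := ih (cs.set i '.') (i + 1) (m + 1) (by omega) (by simp; omega)
        rw [hlen'] at hrec
        have hcast : (i : Int) + 1 = ((i + 1 : Nat) : Int) := by omega
        rw [hcast, hrec]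
        have hget' : (cs.set i '.').getD (i + 1 - 1) ' ' = '.' := by
          have : i + 1 - 1 = i := by omega
          rw [this, List.getD_eq_getElem _ ' ' (by simpa using hilen),
            List.getElem_set_self (by simpa using hilen)]
        rw [hget', pv_drop_dropLast_set cs i (i + 1) '.' (by omega)]
        rw [hdropc]
        simp only [pvScanA]
        rw [if_pos ⟨hbb.1, hgetDi ▸ hbb.2⟩]
      · rw [if_neg hbb]
        have hrec := ih cs (i + 1) m (by omega) (by omega)
        have hcast : (i : Int) + 1 = ((i + 1 : Nat) : Int) := by omega
        rw [hcast, hrec]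
        rw [hdropc]
        simp only [pvScanA]
        rw [if_neg (by rw [hgetDi] at hbb; exact hbb)]
        have : i + 1 - 1 = i := by omega
        rw [this, hgetDi]
    · rw [PySem.List.pyRange_one_eq_nil (by omega)]
      rw [List.drop_eq_nil_of_le (by simp; omega)]
      rfl

-- The whole A loop (from index 1) is the carry scan over dropLast with initial carry '.'.
theorem pvLoopA_top (cs : List Char) :
    ((PySem.List.pyRange 1 ((cs.length : Int) - 1) 1).foldl pvStepA (cs, 0)).2
      = pvScanA '.' cs.dropLast 0 := by
  have h := pvLoopA cs.length cs 1 0 (le_refl 1) (by omega)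
  simp only [Nat.cast_one, Nat.sub_self] at h
  rw [h]
  by_cases hle : cs.length ≤ 1
  · rw [List.drop_eq_nil_of_le (by simp; omega)]
    have hnil : cs.dropLast = [] := List.eq_nil_of_length_eq_zero (by simp; omega)
    rw [hnil]
    rfl
  · have h0 : 0 < cs.dropLast.length := by simp; omega
    have hd : cs.dropLast = cs.dropLast[0] :: cs.dropLast.drop 1 := by
      conv_lhs => rw [← List.drop_zero (l := cs.dropLast)]
      exact List.drop_eq_getElem_cons h0
    conv_rhs => rw [hd]
    have hg : cs.getD 0 ' ' = cs.dropLast[0] := by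
      rw [List.getD_eq_getElem cs ' ' (by omega), List.getElem_dropLast]
    rw [hg]
    simp only [pvScanA]
    rw [if_neg (fun hh => by exact absurd hh.1 (by decide))]

-- B's fold equals pvRun.
theorem pvRun_foldB : ∀ (t : List Char) (m r : Int),
    (t.foldl (fun (st : Int × Int) c =>
        if c = 'B' then (st.1, st.2 + 1) else (st.1 + PySem.Int.floordiv st.2 2, 0)) (m, r)).1
      + PySem.Int.floordiv (t.foldl (fun (st : Int × Int) c =>
        if c = 'B' then (st.1, st.2 + 1) else (st.1 + PySem.Int.floordiv st.2 2, 0)) (m, r)).2 2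
      = pvRun t m r := by
  intro t
  induction t with
  | nil => intro m r; rfl
  | cons c t ih =>
    intro m r
    simp only [List.foldl_cons, pvRun]
    by_cases hc : c = 'B'
    · rw [if_pos hc, if_pos hc]; exact ih m (r + 1)
    · rw [if_neg hc, if_neg hc]; exact ih (m + PySem.Int.floordiv r 2) 0

-- pvRun is the carry scan: carry 'B' iff the running run length is odd.
theorem pvRun_eq_scan : ∀ (t : List Char) (m r : Int), 0 ≤ r →
    pvRun t m r = pvScanA (if r % 2 = 1 then 'B' else '.') t (m + PySem.Int.floordiv r 2) := by
  intro t
  induction t with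
  | nil =>
    intro m r _
    by_cases h : r % 2 = 1 <;> simp [pvRun, pvScanA]
  | cons c t ih =>
    intro m r hr
    by_cases hc : c = 'B'
    · subst hc
      by_cases hodd : r % 2 = 1
      · rw [if_pos hodd]
        simp only [pvRun, pvScanA]
        norm_num
        rw [ih m (r + 1) (by omega), if_neg (by omega : ¬ (r + 1) % 2 = 1)]
        have hfd : PySem.Int.floordiv (r + 1) 2 = PySem.Int.floordiv r 2 + 1 := by
          rw [pv_fd2, pv_fd2]; omega
        rw [hfd]; ring_nf
        rw [pv_fd2]
      · rw [if_neg hodd]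
        simp only [pvRun, pvScanA]
        norm_num
        rw [ih m (r + 1) (by omega), if_pos (by omega : (r + 1) % 2 = 1)]
        have hfd : PySem.Int.floordiv (r + 1) 2 = PySem.Int.floordiv r 2 := by
          rw [pv_fd2, pv_fd2]; omega
        rw [hfd, if_neg (by decide : ¬ ('.' : Char) = 'B'), pv_fd2]
    · have hprev : ∀ p : Char, pvScanA p (c :: t) (m + PySem.Int.floordiv r 2)
          = pvScanA c t (m + PySem.Int.floordiv r 2) := by
        intro p
        simp only [pvScanA]
        rw [if_neg (fun hh => hc hh.2)]
      by_cases hodd : r % 2 = 1 <;>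
        [rw [if_pos hodd, hprev]; rw [if_neg hodd, hprev]] <;>
      · simp only [pvRun]
        rw [if_neg hc, ih (m + PySem.Int.floordiv r 2) 0 (by omega),
          if_neg (by decide : ¬ (0:Int) % 2 = 1)]
        have h0 : PySem.Int.floordiv (0:Int) 2 = 0 := by norm_num [pv_fd2]
        rw [h0, add_zero]
        exact pvScanA_congr t '.' c _
          (by constructor <;> intro hh <;> [exact absurd hh (by decide); exact absurd hh hc])

-- Dropping the last bucket loses exactly one move iff pvDiffB holds.
theorem pvScan_dropLast : ∀ (t : List Char) (prev : Char) (m : Int),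
    pvScanA prev t m = pvScanA prev t.dropLast m + (if pvDiffB prev t then 1 else 0) := by
  intro t
  induction t with
  | nil => intro prev m; simp [pvScanA, pvDiffB]
  | cons c t ih =>
    intro prev m
    cases t with
    | nil =>
      simp only [pvScanA, pvDiffB, List.dropLast_singleton]
      by_cases h : prev = 'B' ∧ c = 'B'
      · rw [if_pos h]
        simp [h.1, h.2]
      · rw [if_neg h]
        have hb : ¬ (decide (prev = 'B') && decide (c = 'B')) = true := by
          simp only [Bool.and_eq_true, decide_eq_true_eq]; exact h
        rw [if_neg hb]
        simp
    | cons c' t' =>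
      have hdl : (c :: c' :: t').dropLast = c :: (c' :: t').dropLast := rfl
      have hD : pvDiffB prev (c :: c' :: t')
          = pvDiffB (if prev = 'B' ∧ c = 'B' then '.' else c) (c' :: t') := rfl
      have hu1 : pvScanA prev (c :: c' :: t') m
          = if prev = 'B' ∧ c = 'B' then pvScanA '.' (c' :: t') (m + 1)
            else pvScanA c (c' :: t') m := rfl
      have hu2 : pvScanA prev (c :: (c' :: t').dropLast) m
          = if prev = 'B' ∧ c = 'B' then pvScanA '.' ((c' :: t').dropLast) (m + 1)
            else pvScanA c ((c' :: t').dropLast) m := rfl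
      rw [hdl, hD, hu1, hu2]
      by_cases h : prev = 'B' ∧ c = 'B'
      · have hif : (if prev = 'B' ∧ c = 'B' then ('.' : Char) else c) = '.' := if_pos h
        rw [if_pos h, if_pos h, hif, ih]
      · have hif : (if prev = 'B' ∧ c = 'B' then ('.' : Char) else c) = c := if_neg h
        rw [if_neg h, if_neg h, hif, ih]

-- pvTrail facts.
theorem pvTrail_all (t : List Char) (h : t.all (fun c => c == 'B') = true) :
    pvTrail t = t.length := by
  unfold pvTrail
  rw [List.takeWhile_eq_self_iff.mpr, List.length_reverse]
  intro x hx
  rw [List.all_eq_true] at h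
  exact h x (List.mem_reverse.mp hx)

theorem pvTrail_cons_all_not (c : Char) (t : List Char) (hc : ¬ c = 'B')
    (h : t.all (fun c => c == 'B') = true) : pvTrail (c :: t) = t.length := by
  unfold pvTrail
  have hself : List.takeWhile (fun c => c == 'B') t.reverse = t.reverse := by
    rw [List.takeWhile_eq_self_iff]
    intro x hx
    rw [List.all_eq_true] at h
    exact h x (List.mem_reverse.mp hx)
  rw [List.reverse_cons, List.takeWhile_append, if_pos (by rw [hself])]
  have hone : List.takeWhile (fun c => c == 'B') [c] = [] := by
    rw [List.takeWhile_cons, if_neg (by simpa using hc)]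
  rw [hone]
  simp

theorem pvTrail_cons_not_all (c : Char) (t : List Char)
    (h : ¬ t.all (fun c => c == 'B') = true) : pvTrail (c :: t) = pvTrail t := by
  unfold pvTrail
  rw [List.reverse_cons, List.takeWhile_append, if_neg]
  intro hl
  apply h
  have heq : List.takeWhile (fun c => c == 'B') t.reverse = t.reverse :=
    (List.takeWhile_sublist _).eq_of_length hl
  rw [List.all_eq_true]
  intro x hx
  exact List.takeWhile_eq_self_iff.mp heq x (List.mem_reverse.mpr hx)

theorem pvDiffB_char : ∀ (t : List Char) (prev : Char),
    pvDiffB prev t =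
      (if t.all (fun c => c == 'B')
       then decide (t ≠ []) && decide ((t.length + (if prev = 'B' then 1 else 0)) % 2 = 0)
       else decide (0 < pvTrail t) && decide (pvTrail t % 2 = 0)) := by
  intro t
  induction t with
  | nil => intro prev; simp [pvDiffB]
  | cons c t ih =>
    intro prev
    cases t with
    | nil =>
      simp only [pvDiffB]
      by_cases hc : c = 'B'
      · rw [if_pos (by simp [hc])]
        by_cases hp : prev = 'B' <;> simp [hp, hc]
      · rw [if_neg (by simp [hc])]
        have ht : pvTrail [c] = 0 := by
          unfold pvTrail
          simp only [List.reverse_singleton]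
          rw [List.takeWhile_cons, if_neg (by simpa using hc)]
          rfl
        simp [ht, hc]
    | cons c' t' =>
      have hD : pvDiffB prev (c :: c' :: t')
          = pvDiffB (if prev = 'B' ∧ c = 'B' then '.' else c) (c' :: t') := rfl
      by_cases hc : c = 'B'
      · by_cases hall : (c' :: t').all (fun c => c == 'B') = true
        · have hallw : ((c :: c' :: t').all (fun c => c == 'B')) = true := by
            rw [List.all_cons, Bool.and_eq_true]
            exact ⟨by simpa using hc, hall⟩
          by_cases hp : prev = 'B'
          · have hif : (if prev = 'B' ∧ c = 'B' then ('.' : Char) else c) = '.' :=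
              if_pos ⟨hp, hc⟩
            rw [hD, hif, ih '.', if_pos hall, if_pos hallw,
              if_neg (by decide : ¬ ('.' : Char) = 'B'), if_pos hp]
            simp only [ne_eq, reduceCtorEq, not_false_eq_true, decide_true, Bool.true_and,
              List.length_cons, add_zero]
            rw [decide_eq_decide]
            omega
          · have hif : (if prev = 'B' ∧ c = 'B' then ('.' : Char) else c) = c :=
              if_neg (fun hh => hp hh.1)
            rw [hD, hif, ih c, if_pos hall, if_pos hallw, if_pos hc, if_neg hp]
            simp only [ne_eq, reduceCtorEq, not_false_eq_true, decide_true, Bool.true_and,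
              List.length_cons, add_zero]
            rw [decide_eq_decide]
        · have hallw : ¬ ((c :: c' :: t').all (fun c => c == 'B')) = true := by
            rw [List.all_cons, Bool.and_eq_true]
            intro hx
            exact hall hx.2
          rw [hD, ih _, if_neg hall, if_neg hallw, pvTrail_cons_not_all c _ hall]
      · by_cases hall : (c' :: t').all (fun c => c == 'B') = true
        · have hallw : ¬ ((c :: c' :: t').all (fun c => c == 'B')) = true := by
            rw [List.all_cons, Bool.and_eq_true]
            intro hx
            exact hc (by simpa using hx.1)
          have hif : (if prev = 'B' ∧ c = 'B' then ('.' : Char) else c) = c :=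
            if_neg (fun hh => hc hh.2)
          rw [hD, hif, ih c, if_pos hall, if_neg hallw, if_neg hc,
            pvTrail_cons_all_not c _ hc hall]
          simp
        · have hallw : ¬ ((c :: c' :: t').all (fun c => c == 'B')) = true := by
            rw [List.all_cons, Bool.and_eq_true]
            intro hx
            exact hall hx.2
          rw [hD, ih _, if_neg hall, if_neg hallw, pvTrail_cons_not_all c _ hall]

theorem pvDiffB_dot (t : List Char) :
    pvDiffB '.' t = (decide (0 < pvTrail t) && decide (pvTrail t % 2 = 0)) := by
  rw [pvDiffB_char]
  by_cases h : t.all (fun c => c == 'B') = true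
  · rw [if_pos h, pvTrail_all t h, if_neg (by decide : ¬ ('.' : Char) = 'B')]
    cases t with
    | nil => simp
    | cons c u =>
      simp
  · rw [if_neg h]

-- A's two-branch guard collapses to B's single guard.
theorem pv_guard (n : Int) (b : Int) :
    (if PySem.Int.mod n 2 = 0 then
      (if b > PySem.Int.floordiv n 2 then (-1 : Int) else 0)
     else (if b > PySem.Int.floordiv (n + 1) 2 then (-1 : Int) else 0))
    = (if b > PySem.Int.floordiv (n + 1) 2 then (-1 : Int) else 0) := by
  by_cases h : PySem.Int.mod n 2 = 0
  · rw [if_pos h]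
    have hm : n % 2 = 0 := by rwa [PySem.Int.mod_eq_emod_of_pos (by omega)] at h
    have : PySem.Int.floordiv n 2 = PySem.Int.floordiv (n + 1) 2 := by
      rw [pv_fd2, pv_fd2]; omega
    rw [this]
  · rw [if_neg h]

-- Both ports, written through the pure scans.
theorem pv_solution_eq (s : String) :
    solution s = (if (PySem.Str.count s "B" : Int) > PySem.Int.floordiv (PySem.Str.len s + 1) 2
      then -1 else pvScanA '.' s.toList.dropLast 0) := by
  simp only [solution]
  rw [pv_guard _ _]
  by_cases h : (PySem.Str.count s "B" : Int) > PySem.Int.floordiv (PySem.Str.len s + 1) 2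
  · rw [if_pos h, if_pos rfl, if_pos h]
  · rw [if_neg h, if_neg (by decide : ¬ (0:Int) = -1), if_neg h]
    have hlen : PySem.List.len s.toList = (s.toList.length : Int) := by simp
    rw [hlen, pvLoopA_top]

theorem pv_solution_alt_eq (s : String) :
    solution_alt s = (if (PySem.Str.count s "B" : Int) > PySem.Int.floordiv (PySem.Str.len s + 1) 2
      then -1 else pvScanA '.' s.toList 0) := by
  simp only [solution_alt]
  by_cases h : (PySem.Str.count s "B" : Int) > PySem.Int.floordiv (PySem.Str.len s + 1) 2
  · rw [if_pos h, if_pos h]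
  · rw [if_neg h, if_neg h]
    have hf := pvRun_foldB s.toList 0 0
    rw [pvRun_eq_scan s.toList 0 0 (by omega)] at hf
    rw [hf]
    rw [if_neg (by decide : ¬ (0:Int) % 2 = 1)]
    have h0 : PySem.Int.floordiv (0:Int) 2 = 0 := by norm_num [pv_fd2]
    rw [h0, add_zero]

-- ===== VERDICT =====
theorem solution_spec : Claim_unchanged_solution := by
  intro s _ hnd
  rw [pv_solution_eq, pv_solution_alt_eq]
  by_cases h : (PySem.Str.count s "B" : Int) > PySem.Int.floordiv (PySem.Str.len s + 1) 2
  · rw [if_pos h, if_pos h]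
  · rw [if_neg h, if_neg h]
    rw [pvScan_dropLast s.toList '.' 0]
    have hfalse : pvDiffB '.' s.toList = false := by
      rw [pvDiffB_dot]
      by_contra hc
      rw [Bool.not_eq_false, Bool.and_eq_true, decide_eq_true_eq, decide_eq_true_eq] at hc
      exact hnd ⟨by omega, hc.1, hc.2⟩
    rw [hfalse]
    simp

theorem solution_changed : Claim_changed_solution := by
  unfold Claim_changed_solution; decide

theorem solution_tight : Claim_exact_solution := by
  intro s _ hD
  obtain ⟨hf, hpos, heven⟩ := hD
  rw [pv_solution_eq, pv_solution_alt_eq, if_neg (by omega), if_neg (by omega)]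
  rw [pvScan_dropLast s.toList '.' 0]
  have htrue : pvDiffB '.' s.toList = true := by
    rw [pvDiffB_dot]
    simp only [Bool.and_eq_true, decide_eq_true_eq]
    exact ⟨hpos, heven⟩
  rw [htrue]
  simp
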